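-- pv_equiv track=rewrite | github.com/secinto/aixcc-afc-atlantis | example-crs-webservice/crs-userspace/microservices/seed_ensembler/seed_ensembler/libensembler/libfuzzer_result.py | align_int_lists_by_checkpoints
-- ===== SOURCE A (Python) =====
-- def align_int_lists_by_checkpoints(
--     checkpoints: list[int],
--     lists: list[list[int]]
-- ) -> list[list[int | None]]:
--     """
--     "Align" two or more lists of sorted values by inserting Nones at the
--     right spots to make their lengths the same, according to a list of
--     "checkpoints".
--
--     The lists in `lists` represent sorted lists of integers that SHOULD
--     be parallel, but in reality, they may not all be exactly the same
--     length. The goal is to "align" them, by inserting Nones at the right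
--     spots to make their lengths the same.
--
--     A simple algorithm would just append some Nones to one or more of
--     the lists, but instead, we make use of the "checkpoints" information
--     -- a list of intermediate values at which the lists should be
--     aligned -- to insert them into better locations.
--
--     It's easier to explain through an example. Consider the input
--
--         lists = [[2, 7, 20, 33, 36, 50],
--                  [3, 6, 22, 26, 35, 37, 52]]
--         checkpoints = [5, 10, 30, 45]
--
--     The algorithm first splits the two lists according to the
--     "checkpoints":
--
--            |   |       |       |
--         [2 | 7 | 20    | 33 36 | 50] <-- lists[0]
--         [3 | 6 | 22 26 | 35 37 | 52] <-- lists[1]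
--            |   |       |       |
--            5   10      30      45    <-- checkpoints
--
--     Now we can see the spot where we should add add a None to the first
--     list to make them aligned properly. So the output will be these two
--     lists:
--
--         [[2, 7, 20, None, 33, 50],
--          [3, 6, 22, 26,   35, 52]]
--
--     (Note: putting the None before the "20" instead of after it would
--     also be a valid solution, though this algorithm doesn't do that.)
--     """
--
--     # Add one final checkpoint at the end, which is larger than all
--     # values across all lists (this simplifies the algorithm)
--     checkpoints = list(checkpoints)
--     max_ = 0
--     for L in lists:
--         if L:
--             max_ = max(max_, max(L))
--     checkpoints.append(max_ + 1)
--
--     new_lists: list[list[int | None]] = [[] for _ in range(len(lists))]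
--     idxs = [0] * len(lists)
--
--     for checkpoint in checkpoints:
--         # Add values from each list until we reach the checkpoint
--         for i, L in enumerate(lists):
--             while idxs[i] < len(L) and L[idxs[i]] < checkpoint:
--                 new_lists[i].append(L[idxs[i]])
--                 idxs[i] += 1
--
--         # Add any required Nones to each list
--         target_length = max(len(L) for L in new_lists)
--         for L in new_lists:
--             while len(L) < target_length:
--                 L.append(None)
--
--         # The lists should be aligned now. Continue to the next
--         # checkpoint
--
--     # Before the loop began, we added an extra checkpoint to the end, so
--     # we can be 100% sure that we've now covered the entirety of all
--     # lists. So we don't need to do anything else to finish up.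
--
--     return new_lists
-- ===== SOURCE B (Python) =====
-- def align_int_lists_by_checkpoints(
--     checkpoints: list[int],
--     lists: list[list[int]]
-- ) -> list[list[int | None]]:
--     """Two-phase rewrite: first split every list into per-checkpoint
--     segments, then pad each segment column to its max length and
--     concatenate."""
--     # Same sentinel checkpoint as the original: one past the global max.
--     max_ = 0
--     for L in lists:
--         if L:
--             max_ = max(max_, max(L))
--     cps = list(checkpoints) + [max_ + 1]
--
--     # Phase 1: split each list into len(cps) segments with a forward pointer.
--     def segments(L: list[int]) -> list[list[int]]:
--         segs, i = [], 0
--         for cp in cps: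
--             j = i
--             while j < len(L) and L[j] < cp:
--                 j += 1
--             segs.append(L[i:j])
--             i = j
--         return segs
--
--     all_segs = [segments(L) for L in lists]
--
--     # Phase 2: pad each segment column to its maximum length.
--     targets = [max(len(segs[j]) for segs in all_segs) for j in range(len(cps))]
--
--     out: list[list[int | None]] = []
--     for segs in all_segs:
--         row: list[int | None] = []
--         for seg, t in zip(segs, targets):
--             row += seg + [None] * (t - len(seg))
--         out.append(row)
--     return out
-- ===== Notes on version B (the rewrite author's own statement) =====
-- stated objective: simpler
-- what changed: A interleaves bucketization and padding in one loop over checkpoints mutating all lists and index pointers in parallel; B is two independent phases: split each list into per-checkpoint segments, then pad each segment column to its max length and concatenate.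
import Mathlib
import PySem

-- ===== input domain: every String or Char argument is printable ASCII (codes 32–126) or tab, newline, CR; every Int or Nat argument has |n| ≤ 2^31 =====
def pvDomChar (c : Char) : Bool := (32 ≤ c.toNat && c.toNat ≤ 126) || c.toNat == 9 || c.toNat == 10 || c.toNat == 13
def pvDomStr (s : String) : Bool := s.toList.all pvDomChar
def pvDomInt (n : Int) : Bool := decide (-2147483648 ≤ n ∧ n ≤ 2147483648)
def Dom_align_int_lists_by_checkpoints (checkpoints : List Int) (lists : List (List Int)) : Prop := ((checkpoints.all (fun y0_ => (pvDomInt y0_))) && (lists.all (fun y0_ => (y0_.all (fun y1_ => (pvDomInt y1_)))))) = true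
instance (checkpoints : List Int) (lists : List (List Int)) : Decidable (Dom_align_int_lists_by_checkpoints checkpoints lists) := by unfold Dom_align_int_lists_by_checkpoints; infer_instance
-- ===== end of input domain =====

-- B re-decomposes A's single interleaved checkpoint loop into two phases
-- (segment every list, then pad segment columns); objective: simpler. A = B proved for lists ≠ [].

-- ===== PORT A =====
-- Python `max(L)`; the [] case is unreachable in the port (guarded by `if L:` / nonemptiness).
def pyMaxIntA : List Int → Int
  | [] => 0
  | x :: xs => xs.foldl max x

def pyMaxNatA : List Nat → Nat
  | [] => 0
  | x :: xs => xs.foldl max x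

-- `while idxs[i] < len(L) and L[idxs[i]] < checkpoint: new_lists[i].append(L[idxs[i]]); idxs[i] += 1`
def aWhileFuel (L : List Int) (cp : Int) : Nat → Nat → List (Option Int) →
    List (Option Int) × Nat
  | 0, idx, acc => (acc, idx)
  | fuel + 1, idx, acc =>
    if h : idx < L.length then
      if L[idx] < cp then aWhileFuel L cp fuel (idx + 1) (acc ++ [some L[idx]]) else (acc, idx)
    else (acc, idx)

-- the fuel `L.length - idx` only bounds the number of iterations (totality guard)
def aWhile (L : List Int) (cp : Int) (idx : Nat) (acc : List (Option Int)) :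
    List (Option Int) × Nat :=
  aWhileFuel L cp (L.length - idx) idx acc

-- `while len(L) < target_length: L.append(None)`
def padToFuel (target : Nat) : Nat → List (Option Int) → List (Option Int)
  | 0, l => l
  | fuel + 1, l => if l.length < target then padToFuel target fuel (l ++ [none]) else l

-- the fuel `target - l.length` only bounds the number of iterations (totality guard)
def padTo (l : List (Option Int)) (target : Nat) : List (Option Int) :=
  padToFuel target (target - l.length) l

-- one iteration of `for checkpoint in checkpoints:`; each list's (new_list, idx) state is
-- updated independently by the enumerate loop, then all are padded to the common target
def stepA (st : List (List Int × List (Option Int) × Nat)) (cp : Int) :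
    List (List Int × List (Option Int) × Nat) :=
  let st1 := st.map (fun t => let r := aWhile t.1 cp t.2.2 t.2.1; (t.1, r.1, r.2))
  let target := pyMaxNatA (st1.map (fun t => t.2.1.length))
  st1.map (fun t => (t.1, padTo t.2.1 target, t.2.2))

def align_int_lists_by_checkpoints (checkpoints : List Int) (lists : List (List Int)) :
    List (List (Option Int)) :=
  let max_ : Int := lists.foldl (fun m L => if L.isEmpty then m else max m (pyMaxIntA L)) 0
  let cps := checkpoints ++ [max_ + 1]
  (cps.foldl stepA (lists.map (fun L => (L, ([] : List (Option Int)), (0 : Nat))))).map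
    (fun t => t.2.1)

-- ===== PORT B =====
def pyMaxIntB : List Int → Int
  | [] => 0
  | x :: xs => xs.foldl max x

def pyMaxNatB : List Nat → Nat
  | [] => 0
  | x :: xs => xs.foldl max x

-- `j = i; while j < len(L) and L[j] < cp: j += 1`
def bScanFuel (L : List Int) (cp : Int) : Nat → Nat → Nat
  | 0, j => j
  | fuel + 1, j =>
    if h : j < L.length then (if L[j] < cp then bScanFuel L cp fuel (j + 1) else j) else j

-- the fuel `L.length - j` only bounds the number of iterations (totality guard)
def bScan (L : List Int) (cp : Int) (j : Nat) : Nat :=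
  bScanFuel L cp (L.length - j) j

-- phase 1: `segments(L)`; the slice L[i:j] with 0 ≤ i ≤ j ≤ len(L) is exactly (L.drop i).take (j - i)
def segmentsB (cps : List Int) (L : List Int) : List (List Int) :=
  (cps.foldl
    (fun (p : List (List Int) × Nat) cp =>
      let j := bScan L cp p.2
      (p.1 ++ [(L.drop p.2).take (j - p.2)], j))
    ([], 0)).1

def align_int_lists_by_checkpoints_alt (checkpoints : List Int) (lists : List (List Int)) :
    List (List (Option Int)) :=
  let max_ : Int := lists.foldl (fun m L => if L.isEmpty then m else max m (pyMaxIntB L)) 0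
  let cps := checkpoints ++ [max_ + 1]
  let allSegs := lists.map (fun L => segmentsB cps L)
  let targets := (List.range cps.length).map
    (fun j => pyMaxNatB (allSegs.map (fun segs => (segs.getD j []).length)))
  allSegs.map (fun segs =>
    ((segs.zip targets).map
      (fun q => q.1.map some ++ List.replicate (q.2 - q.1.length) (none : Option Int))).flatten)

-- ===== PRECONDITION & SPEC =====
-- Pre_ excludes only lists = [], where the Python A raises ValueError (max() of an empty sequence).
def Pre_align_int_lists_by_checkpoints (checkpoints : List Int) (lists : List (List Int)) : Prop :=
  lists ≠ []
instance (checkpoints : List Int) (lists : List (List Int)) : Decidable (Pre_align_int_lists_by_checkpoints checkpoints lists) := by unfold Pre_align_int_lists_by_checkpoints; infer_instance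

def pvWitness_align_int_lists_by_checkpoints : List Int × List (List Int) :=
  ([5, 10, 30, 45], [[2, 7, 20, 33, 36, 50], [3, 6, 22, 26, 35, 37, 52]])

def Spec_align_int_lists_by_checkpoints (checkpoints : List Int) (lists : List (List Int)) (out : List (List (Option Int))) : Prop := out = align_int_lists_by_checkpoints_alt checkpoints lists
instance (checkpoints : List Int) (lists : List (List Int)) (out : List (List (Option Int))) : Decidable (Spec_align_int_lists_by_checkpoints checkpoints lists out) := by unfold Spec_align_int_lists_by_checkpoints; infer_instance

-- ===== CLAIM (what is proved, stated in full; the proofs are below) =====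
def Claim_equal_align_int_lists_by_checkpoints : Prop := ∀ (checkpoints : List Int) (lists : List (List Int)), Dom_align_int_lists_by_checkpoints checkpoints lists → Pre_align_int_lists_by_checkpoints checkpoints lists → Spec_align_int_lists_by_checkpoints checkpoints lists (align_int_lists_by_checkpoints checkpoints lists)

-- ===== LEMMAS AND PROOFS =====

-- the one segment cut off at position `i` by checkpoint `cp`
def segOne (L : List Int) (i : Nat) (cp : Int) : List Int :=
  (L.drop i).takeWhile (fun x => decide (x < cp))

-- all segments of L w.r.t. the checkpoint list, starting at position i
def segsFrom (L : List Int) (i : Nat) : List Int → List (List Int)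
  | [] => []
  | cp :: cps => segOne L i cp :: segsFrom L (i + (segOne L i cp).length) cps

-- common specification: remaining output rows given remaining checkpoints and (list, pointer) pairs
def rest (cps : List Int) (ps : List (List Int × Nat)) : List (List (Option Int)) :=
  match cps with
  | [] => ps.map (fun _ => [])
  | cp :: cps' =>
    let segs := ps.map (fun p => segOne p.1 p.2 cp)
    let T := pyMaxNatA (segs.map List.length)
    let tails := rest cps' (ps.map (fun p => (p.1, p.2 + (segOne p.1 p.2 cp).length)))
    (segs.zip tails).map (fun q => q.1.map some ++ List.replicate (T - q.1.length) none ++ q.2)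

theorem pyMaxNatB_eq (l : List Nat) : pyMaxNatB l = pyMaxNatA l := by
  cases l <;> rfl

theorem aWhileFuel_eq (L : List Int) (cp : Int) :
    ∀ (fuel idx : Nat) (acc : List (Option Int)), L.length - idx ≤ fuel →
    aWhileFuel L cp fuel idx acc
      = (acc ++ (segOne L idx cp).map some, idx + (segOne L idx cp).length) := by
  intro fuel
  induction fuel with
  | zero =>
    intro idx acc hle
    have hseg : segOne L idx cp = [] := by
      unfold segOne
      rw [List.drop_eq_nil_of_le (by omega)]
      rfl
    simp [aWhileFuel, hseg]
  | succ fuel ih =>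
    intro idx acc hle
    by_cases h : idx < L.length
    · by_cases hlt : L[idx] < cp
      · have hseg : segOne L idx cp = L[idx] :: segOne L (idx + 1) cp := by
          unfold segOne
          rw [List.drop_eq_getElem_cons h, List.takeWhile_cons]
          simp [hlt]
        simp only [aWhileFuel, dif_pos h, if_pos hlt]
        rw [ih (idx + 1) (acc ++ [some L[idx]]) (by omega), hseg]
        refine Prod.ext ?_ ?_
        · simp
        · simp; omega
      · have hseg : segOne L idx cp = [] := by
          unfold segOne
          rw [List.drop_eq_getElem_cons h, List.takeWhile_cons]
          simp [hlt]
        simp [aWhileFuel, h, hlt, hseg]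
    · have hseg : segOne L idx cp = [] := by
        unfold segOne
        rw [List.drop_eq_nil_of_le (by omega)]
        rfl
      simp [aWhileFuel, h, hseg]

theorem aWhile_eq (L : List Int) (cp : Int) (idx : Nat) (acc : List (Option Int)) :
    aWhile L cp idx acc = (acc ++ (segOne L idx cp).map some, idx + (segOne L idx cp).length) :=
  aWhileFuel_eq L cp (L.length - idx) idx acc le_rfl

theorem bScanFuel_eq (L : List Int) (cp : Int) :
    ∀ (fuel j : Nat), L.length - j ≤ fuel →
    bScanFuel L cp fuel j = j + (segOne L j cp).length := by
  intro fuel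
  induction fuel with
  | zero =>
    intro j hle
    have hseg : segOne L j cp = [] := by
      unfold segOne
      rw [List.drop_eq_nil_of_le (by omega)]
      rfl
    simp [bScanFuel, hseg]
  | succ fuel ih =>
    intro j hle
    by_cases h : j < L.length
    · by_cases hlt : L[j] < cp
      · have hseg : segOne L j cp = L[j] :: segOne L (j + 1) cp := by
          unfold segOne
          rw [List.drop_eq_getElem_cons h, List.takeWhile_cons]
          simp [hlt]
        simp only [bScanFuel, dif_pos h, if_pos hlt]
        rw [ih (j + 1) (by omega), hseg]
        simp; omega
      · have hseg : segOne L j cp = [] := by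
          unfold segOne
          rw [List.drop_eq_getElem_cons h, List.takeWhile_cons]
          simp [hlt]
        simp [bScanFuel, h, hlt, hseg]
    · have hseg : segOne L j cp = [] := by
        unfold segOne
        rw [List.drop_eq_nil_of_le (by omega)]
        rfl
      simp [bScanFuel, h, hseg]

theorem bScan_eq (L : List Int) (cp : Int) (j : Nat) :
    bScan L cp j = j + (segOne L j cp).length :=
  bScanFuel_eq L cp (L.length - j) j le_rfl

theorem padToFuel_eq (target : Nat) :
    ∀ (fuel : Nat) (l : List (Option Int)), target - l.length ≤ fuel →
    padToFuel target fuel l = l ++ List.replicate (target - l.length) none := by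
  intro fuel
  induction fuel with
  | zero =>
    intro l hle
    have hk : target - l.length = 0 := by omega
    simp [padToFuel, hk]
  | succ fuel ih =>
    intro l hle
    by_cases hlen : l.length < target
    · simp only [padToFuel, if_pos hlen]
      rw [ih (l ++ [none]) (by simp; omega)]
      have hk : target - l.length = (target - (l ++ [none]).length) + 1 := by simp; omega
      rw [hk]
      simp [List.replicate_succ]
    · have hk : target - l.length = 0 := by omega
      simp [padToFuel, hlen, hk]

theorem padTo_eq (l : List (Option Int)) (t : Nat) :
    padTo l t = l ++ List.replicate (t - l.length) none :=
  padToFuel_eq t (t - l.length) l le_rfl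

theorem segmentsB_go (L : List Int) (cps : List Int) :
    ∀ (acc : List (List Int)) (i : Nat),
    (cps.foldl
      (fun (p : List (List Int) × Nat) cp =>
        let j := bScan L cp p.2
        (p.1 ++ [(L.drop p.2).take (j - p.2)], j))
      (acc, i)).1 = acc ++ segsFrom L i cps := by
  induction cps with
  | nil => intro acc i; simp [segsFrom]
  | cons cp cps ih =>
    intro acc i
    simp only [List.foldl_cons]
    have htake : (L.drop i).take (bScan L cp i - i) = segOne L i cp := by
      rw [bScan_eq]
      have : i + (segOne L i cp).length - i = (segOne L i cp).length := by omega
      rw [this]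
      exact (List.prefix_iff_eq_take.mp (List.takeWhile_prefix _)).symm
    rw [htake, bScan_eq]
    rw [ih]
    simp [segsFrom]

theorem segmentsB_eq (cps : List Int) (L : List Int) :
    segmentsB cps L = segsFrom L 0 cps := by
  unfold segmentsB
  simpa using segmentsB_go L cps [] 0

theorem foldl_max_add (xs : List Nat) (P a : Nat) :
    List.foldl max (P + a) (xs.map (fun s => P + s)) = P + List.foldl max a xs := by
  induction xs generalizing a with
  | nil => rfl
  | cons x xs ih =>
    have h : max (P + a) (P + x) = P + max a x := by omega
    simp only [List.map_cons, List.foldl_cons, h, ih]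

theorem pyMaxNat_map_add (l : List Nat) (P : Nat) (h : l ≠ []) :
    pyMaxNatA (l.map (fun s => P + s)) = P + pyMaxNatA l := by
  cases l with
  | nil => exact absurd rfl h
  | cons x xs => simp [pyMaxNatA, foldl_max_add]

theorem le_foldl_max (a : Nat) (xs : List Nat) : a ≤ xs.foldl max a := by
  induction xs generalizing a with
  | nil => exact le_rfl
  | cons x xs ih => exact le_trans (Nat.le_max_left a x) (ih _)

theorem mem_le_foldl_max {x : Nat} {xs : List Nat} (a : Nat) (h : x ∈ xs) :
    x ≤ xs.foldl max a := by
  induction xs generalizing a with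
  | nil => cases h
  | cons y ys ih =>
    rcases List.mem_cons.mp h with rfl | h'
    · exact le_trans (Nat.le_max_right a x) (le_foldl_max _ _)
    · exact ih _ h'

theorem le_pyMaxNat {x : Nat} {l : List Nat} (h : x ∈ l) : x ≤ pyMaxNatA l := by
  cases l with
  | nil => cases h
  | cons y ys =>
    rcases List.mem_cons.mp h with rfl | h'
    · exact le_foldl_max _ _
    · exact mem_le_foldl_max _ h'

theorem rest_length (cps : List Int) (ps : List (List Int × Nat)) :
    (rest cps ps).length = ps.length := by
  induction cps generalizing ps with
  | nil => simp [rest]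
  | cons cp cps ih => simp [rest, ih]

-- fuse a zip over (st.map F) with a zip over (st.map s) pointwise
theorem zip_fuse {α β γ δ μ ρ : Type} (st : List α) (tails : List β)
    (F : α → γ) (s : α → δ) (out1 : γ → β → ρ) (mid : δ → β → μ) (out2 : α → μ → ρ)
    (h : ∀ a b, out1 (F a) b = out2 a (mid (s a) b)) :
    ((st.map F).zip tails).map (fun q => out1 q.1 q.2)
      = (st.zip (((st.map s).zip tails).map (fun q => mid q.1 q.2))).map
          (fun q => out2 q.1 q.2) := by
  induction st generalizing tails with
  | nil => simp
  | cons a st ih =>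
    cases tails with
    | nil => simp
    | cons b tails => simp [ih, h]

theorem stepA_eq (st : List (List Int × List (Option Int) × Nat)) (cp : Int) (P : Nat)
    (hne : st ≠ []) (hP : ∀ t ∈ st, t.2.1.length = P) :
    stepA st cp = st.map (fun t =>
      (t.1,
       t.2.1 ++ (segOne t.1 t.2.2 cp).map some
         ++ List.replicate
              (pyMaxNatA (st.map (fun u => (segOne u.1 u.2.2 cp).length))
                 - (segOne t.1 t.2.2 cp).length) none,
       t.2.2 + (segOne t.1 t.2.2 cp).length)) := by
  have htar :
      pyMaxNatA ((st.map (fun t =>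
          (t.1, t.2.1 ++ (segOne t.1 t.2.2 cp).map some,
           t.2.2 + (segOne t.1 t.2.2 cp).length))).map (fun t => t.2.1.length))
        = P + pyMaxNatA (st.map (fun u => (segOne u.1 u.2.2 cp).length)) := by
    rw [List.map_map]
    have hmaps : st.map (fun t =>
          ((t.1, t.2.1 ++ (segOne t.1 t.2.2 cp).map some,
            t.2.2 + (segOne t.1 t.2.2 cp).length) : List Int × List (Option Int) × Nat).2.1.length)
        = (st.map (fun u => (segOne u.1 u.2.2 cp).length)).map (fun s => P + s) := by
      rw [List.map_map]
      exact List.map_congr_left (fun t ht => by simp [hP t ht])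
    rw [show ((fun (t : List Int × List (Option Int) × Nat) => t.2.1.length) ∘
          (fun t => (t.1, t.2.1 ++ (segOne t.1 t.2.2 cp).map some,
            t.2.2 + (segOne t.1 t.2.2 cp).length)))
        = fun (t : List Int × List (Option Int) × Nat) =>
            ((t.1, t.2.1 ++ (segOne t.1 t.2.2 cp).map some,
              t.2.2 + (segOne t.1 t.2.2 cp).length) : List Int × List (Option Int) × Nat).2.1.length
        from rfl]
    rw [hmaps]
    exact pyMaxNat_map_add _ P (by simpa using hne)
  simp only [stepA, aWhile_eq, List.map_map]
  rw [List.map_map] at htar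
  rw [htar]
  apply List.map_congr_left
  intro t ht
  simp only [Function.comp]
  rw [padTo_eq]
  have hlen : (t.2.1 ++ (segOne t.1 t.2.2 cp).map some).length
      = P + (segOne t.1 t.2.2 cp).length := by simp [hP t ht]
  rw [hlen]
  have hcnt : P + pyMaxNatA (st.map (fun u => (segOne u.1 u.2.2 cp).length))
        - (P + (segOne t.1 t.2.2 cp).length)
      = pyMaxNatA (st.map (fun u => (segOne u.1 u.2.2 cp).length))
        - (segOne t.1 t.2.2 cp).length := by omega
  rw [hcnt]

theorem loopA (cps : List Int) :
    ∀ (st : List (List Int × List (Option Int) × Nat)) (P : Nat),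
    st ≠ [] → (∀ t ∈ st, t.2.1.length = P) →
    (cps.foldl stepA st).map (fun t => t.2.1)
      = (st.zip (rest cps (st.map (fun t => (t.1, t.2.2))))).map (fun q => q.1.2.1 ++ q.2) := by
  induction cps with
  | nil =>
    intro st P hne hP
    clear hne hP
    induction st with
    | nil => simp [rest]
    | cons t st ih =>
      simp only [rest, List.map_map] at ih ⊢
      simp only [List.foldl_nil] at ih ⊢
      simp [ih]
  | cons cp cps ih =>
    intro st P hne hP
    have hTle : ∀ t ∈ st, (segOne t.1 t.2.2 cp).length
        ≤ pyMaxNatA (st.map (fun u => (segOne u.1 u.2.2 cp).length)) :=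
      fun t ht => le_pyMaxNat (List.mem_map_of_mem ht)
    have hne' : st.map (fun t =>
        (t.1,
         t.2.1 ++ (segOne t.1 t.2.2 cp).map some
           ++ List.replicate
                (pyMaxNatA (st.map (fun u => (segOne u.1 u.2.2 cp).length))
                   - (segOne t.1 t.2.2 cp).length) none,
         t.2.2 + (segOne t.1 t.2.2 cp).length)) ≠ [] := by simpa using hne
    have hP' : ∀ t' ∈ st.map (fun t =>
        (t.1,
         t.2.1 ++ (segOne t.1 t.2.2 cp).map some
           ++ List.replicate
                (pyMaxNatA (st.map (fun u => (segOne u.1 u.2.2 cp).length))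
                   - (segOne t.1 t.2.2 cp).length) none,
         t.2.2 + (segOne t.1 t.2.2 cp).length)),
        t'.2.1.length = P + pyMaxNatA (st.map (fun u => (segOne u.1 u.2.2 cp).length)) := by
      intro t' ht'
      rcases List.mem_map.mp ht' with ⟨t, ht, rfl⟩
      have := hP t ht
      have := hTle t ht
      simp only [List.length_append, List.length_map, List.length_replicate]
      omega
    rw [List.foldl_cons, stepA_eq st cp P hne hP, ih _ _ hne' hP']
    conv_rhs => rw [rest]
    simp only [List.map_map, Function.comp_def]
    rw [zip_fuse st
      (rest cps (st.map fun t => (t.1, t.2.2 + (segOne t.1 t.2.2 cp).length)))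
      (fun t =>
        (t.1,
         t.2.1 ++ (segOne t.1 t.2.2 cp).map some
           ++ List.replicate
                (pyMaxNatA (st.map (fun u => (segOne u.1 u.2.2 cp).length))
                   - (segOne t.1 t.2.2 cp).length) none,
         t.2.2 + (segOne t.1 t.2.2 cp).length))
      (fun t => segOne t.1 t.2.2 cp)
      (fun c b => c.2.1 ++ b)
      (fun s b => s.map some
         ++ List.replicate
              (pyMaxNatA (st.map (fun u => (segOne u.1 u.2.2 cp).length)) - s.length) none
         ++ b)
      (fun a m => a.2.1 ++ m)
      (fun a b => by simp [List.append_assoc])]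

theorem B_rest (cps : List Int) :
    ∀ (ps : List (List Int × Nat)),
    (ps.map (fun p => segsFrom p.1 p.2 cps)).map (fun segs =>
      ((segs.zip ((List.range cps.length).map
          (fun j => pyMaxNatA ((ps.map (fun p => segsFrom p.1 p.2 cps)).map
            (fun segs => (segs.getD j []).length))))).map
        (fun q => q.1.map some ++ List.replicate (q.2 - q.1.length) (none : Option Int))).flatten)
      = rest cps ps := by
  induction cps with
  | nil => intro ps; simp [rest, segsFrom]
  | cons cp cps ih =>
    intro ps
    rw [rest]
    rw [← ih (ps.map (fun p => (p.1, p.2 + (segOne p.1 p.2 cp).length)))]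
    simp only [segsFrom, List.length_cons, List.range_succ_eq_map, List.map_cons,
      List.map_map, List.zip_cons_cons, List.flatten_cons, List.getD_cons_zero,
      List.getD_cons_succ, Function.comp_def, Nat.succ_eq_add_one, List.zip_map',
      List.append_assoc]

theorem final_core (CPS : List Int) (lists : List (List Int)) (hpre : lists ≠ []) :
    (CPS.foldl stepA (lists.map (fun L => (L, ([] : List (Option Int)), (0 : Nat))))).map
        (fun t => t.2.1)
      = (lists.map (fun L => segmentsB CPS L)).map (fun segs =>
          ((segs.zip ((List.range CPS.length).map
              (fun j => pyMaxNatB ((lists.map (fun L => segmentsB CPS L)).map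
                (fun segs => (segs.getD j []).length))))).map
            (fun q => q.1.map some
              ++ List.replicate (q.2 - q.1.length) (none : Option Int))).flatten) := by
  simp only [pyMaxNatB_eq]
  have hne : lists.map (fun L => (L, ([] : List (Option Int)), (0 : Nat))) ≠ [] := by
    simpa using hpre
  have h0 : ∀ t ∈ lists.map (fun L => (L, ([] : List (Option Int)), (0 : Nat))),
      t.2.1.length = 0 := by
    intro t ht
    rcases List.mem_map.mp ht with ⟨L, _, rfl⟩
    rfl
  rw [loopA _ _ 0 hne h0]
  simp only [List.map_map]
  have hsnd : ∀ (r : List (List (Option Int))),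
      r.length = lists.length →
      ((lists.map (fun L => (L, ([] : List (Option Int)), (0 : Nat)))).zip r).map
        (fun q => q.1.2.1 ++ q.2) = r := by
    intro r hr
    have : ((lists.map (fun L => (L, ([] : List (Option Int)), (0 : Nat)))).zip r).map
        (fun q => q.1.2.1 ++ q.2)
      = ((lists.map (fun L => (L, ([] : List (Option Int)), (0 : Nat)))).zip r).map
        Prod.snd := by
      apply List.map_congr_left
      intro q hq
      have h1 := (List.of_mem_zip hq).1
      rcases List.mem_map.mp h1 with ⟨L, _, hL⟩
      rw [← hL]
      rfl
    rw [this]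
    exact List.map_snd_zip (by simp [hr])
  rw [hsnd _ (by rw [rest_length]; simp)]
  simp only [Function.comp_def, segmentsB_eq]
  rw [← B_rest _ (lists.map (fun L => (L, (0 : Nat))))]
  simp only [List.map_map, Function.comp_def]

-- ===== VERDICT (by name: the statement is the Claim_ definition above) =====
theorem align_int_lists_by_checkpoints_spec : Claim_equal_align_int_lists_by_checkpoints := by
  intro checkpoints lists hdom hpre
  unfold Pre_align_int_lists_by_checkpoints at hpre
  unfold Spec_align_int_lists_by_checkpoints
  exact final_core
    (checkpoints ++
      [lists.foldl (fun m L => if L.isEmpty then m else max m (pyMaxIntA L)) 0 + 1])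
    lists hpre
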